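-- pv_equiv track=rewrite | github.com/mingzhe-zhang/risc-graph-translator | BFS_FPGA1.0/translator-1.2/Assem-Genearator-Sample/rg-gen.py | conflict_predict
-- ===== SOURCE A (Python) =====
-- def conflict_predict(PE1_num, addr1, PE2_num, addr2, PE2_start, exeblock_per_PE, cal_op1, cal_op2, bias, addr_occu):
--
--     while(1):
--         flag = 0
--         for i in range(len(addr1)*(exeblock_per_PE)):
--             if PE2_start+i+256-bias in addr_occu[int(PE2_num / exeblock_per_PE)]:
--                 PE2_start += 1
--                 flag = 1
--         if flag == 0:
--             break
--     return PE2_start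
-- ===== SOURCE B (Python) =====
-- def conflict_predict(PE1_num, addr1, PE2_num, addr2, PE2_start, exeblock_per_PE, cal_op1, cal_op2, bias, addr_occu):
--     window = len(addr1) * exeblock_per_PE
--     if window <= 0:
--         return PE2_start
--     occupied = addr_occu[int(PE2_num / exeblock_per_PE)]
--     base = 256 - bias
--     start = PE2_start
--     # one pass over the occupied addresses in ascending order: each address that
--     # falls inside the current window pushes the window start just past it
--     for a in sorted(occupied):
--         if start + base <= a < start + window + base:
--             start = a - base + 1
--     return start
-- ===== Notes on version B (the rewrite author's own statement) =====
-- stated objective: faster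
-- what changed: A repeatedly rescans the whole address window with a linear 'in list' membership test, bumping the start by 1 per conflict; B sorts the occupied list once and makes a single ascending pass, jumping the window start just past each occupied address that falls inside the current window.
import Mathlib
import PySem

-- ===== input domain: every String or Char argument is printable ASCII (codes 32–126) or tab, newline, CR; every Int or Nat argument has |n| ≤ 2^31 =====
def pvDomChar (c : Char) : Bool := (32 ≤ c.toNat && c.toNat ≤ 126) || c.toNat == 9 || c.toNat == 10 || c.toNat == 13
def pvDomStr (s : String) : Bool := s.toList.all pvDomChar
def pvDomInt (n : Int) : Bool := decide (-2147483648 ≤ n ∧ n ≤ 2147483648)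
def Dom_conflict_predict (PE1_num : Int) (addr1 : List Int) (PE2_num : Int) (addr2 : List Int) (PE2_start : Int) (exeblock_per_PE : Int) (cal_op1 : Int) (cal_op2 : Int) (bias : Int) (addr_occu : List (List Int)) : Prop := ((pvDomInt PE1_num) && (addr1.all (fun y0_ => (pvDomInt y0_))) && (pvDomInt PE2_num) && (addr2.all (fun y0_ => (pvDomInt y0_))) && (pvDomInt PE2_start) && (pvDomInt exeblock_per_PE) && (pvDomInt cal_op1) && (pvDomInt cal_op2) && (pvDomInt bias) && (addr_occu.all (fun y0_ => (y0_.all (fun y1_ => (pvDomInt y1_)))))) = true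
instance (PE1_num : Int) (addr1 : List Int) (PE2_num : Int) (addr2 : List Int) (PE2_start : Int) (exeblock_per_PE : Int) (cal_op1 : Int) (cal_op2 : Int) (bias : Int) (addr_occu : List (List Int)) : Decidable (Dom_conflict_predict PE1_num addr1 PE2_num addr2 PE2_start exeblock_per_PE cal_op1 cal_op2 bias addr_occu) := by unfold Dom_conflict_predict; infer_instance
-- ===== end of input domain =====

-- B replaces A's repeated window rescans (with list membership) by one ascending pass over the
-- occupied addresses, sorted once (objective: faster).

-- ===== PORT A =====
-- one step of A's inner `for i in range(...)` loop: state = (PE2_start, flag)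
def cpStep (S : List Int) (c : Int) (st : Int × Bool) (i : Int) : Int × Bool :=
  if S.contains (st.1 + i + c) then (st.1 + 1, true) else st

-- A's inner `for` loop over the index list
def cpPass (S : List Int) (c : Int) (idxs : List Int) (st : Int × Bool) : Int × Bool :=
  idxs.foldl (cpStep S c) st

-- (termination helpers for the `while(1)` loop; used by `decreasing_by`)
def cpMax (S : List Int) (c : Int) (p : Int) : Int :=
  S.foldl (fun m a => max m (a - c + 1)) p

theorem foldl_max_le_init (f : Int → Int) :
    ∀ (S : List Int) (x : Int), x ≤ S.foldl (fun m a => max m (f a)) x := by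
  intro S
  induction S with
  | nil => intro x; simp
  | cons a S ih =>
    intro x
    have h := ih (max x (f a))
    simpa using le_trans (le_max_left x (f a)) h

theorem foldl_max_mem (f : Int → Int) :
    ∀ (S : List Int) (a : Int), a ∈ S → ∀ x : Int, f a ≤ S.foldl (fun m a => max m (f a)) x := by
  intro S
  induction S with
  | nil => intro a ha; simp at ha
  | cons b S ih =>
    intro a ha x
    rcases List.mem_cons.mp ha with h | h
    · subst h
      have h := foldl_max_le_init f S (max x (f a))
      simpa using le_trans (le_max_right x (f a)) h
    · simpa using ih a h (max x (f b))

theorem foldl_max_max (f : Int → Int) :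
    ∀ (S : List Int) (x y : Int),
      S.foldl (fun m a => max m (f a)) (max x y) = max x (S.foldl (fun m a => max m (f a)) y) := by
  intro S
  induction S with
  | nil => intro x y; simp
  | cons a S ih =>
    intro x y
    simp only [List.foldl_cons]
    rw [max_assoc, ih]

theorem cpPass_fst_le (S : List Int) (c : Int) :
    ∀ (idxs : List Int) (st : Int × Bool), st.1 ≤ (cpPass S c idxs st).1 := by
  intro idxs
  induction idxs with
  | nil => intro st; simp [cpPass]
  | cons i idxs ih =>
    intro st
    have h1 : st.1 ≤ (cpStep S c st i).1 := by
      unfold cpStep; split <;> simp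
    have h2 := ih (cpStep S c st i)
    simp only [cpPass, List.foldl_cons] at *
    omega

theorem cpPass_hit (S : List Int) (c : Int) :
    ∀ (idxs : List Int), (∀ i ∈ idxs, 0 ≤ i) →
      ∀ st : Int × Bool, st.2 = false → (cpPass S c idxs st).2 = true →
      st.1 < (cpPass S c idxs st).1 ∧ ∃ a ∈ S, st.1 + c ≤ a := by
  intro idxs
  induction idxs with
  | nil => intro _ st hf hr; simp [cpPass] at hr; rw [hr] at hf; exact absurd hf (by simp)
  | cons i idxs ih =>
    intro hidx st hf hr
    have hi0 : (0:Int) ≤ i := hidx i (List.mem_cons_self)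
    by_cases h : S.contains (st.1 + i + c) = true
    · have hmem : st.1 + i + c ∈ S := by simpa using h
      have hstep : cpStep S c st i = (st.1 + 1, true) := by unfold cpStep; simp [hmem]
      have hle : (st.1 + 1 : Int) ≤ (cpPass S c idxs (st.1 + 1, true)).1 := cpPass_fst_le S c idxs _
      refine ⟨?_, st.1 + i + c, hmem, by omega⟩
      simp only [cpPass, List.foldl_cons, hstep] at *
      omega
    · have hmem : st.1 + i + c ∉ S := by simpa using h
      have hstep : cpStep S c st i = st := by unfold cpStep; simp [hmem]
      simp only [cpPass, List.foldl_cons, hstep] at hr ⊢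
      exact ih (fun j hj => hidx j (List.mem_cons_of_mem _ hj)) st hf hr

-- A's `while(1)` loop; the range is recomputed each pass, as in the Python.
def cpLoop (S : List Int) (c L p : Int) : Int :=
  let r := cpPass S c (PySem.List.pyRange 0 L 1) (p, false)
  if h : r.2 = true then cpLoop S c L r.1 else r.1
termination_by (cpMax S c p - p).toNat
decreasing_by
  have hidx : ∀ i ∈ PySem.List.pyRange 0 L 1, (0:Int) ≤ i := by
    intro i hi
    have := (PySem.List.mem_pyRange_one).mp hi
    omega
  obtain ⟨hlt, a, haS, hge⟩ := cpPass_hit S c _ hidx (p, false) rfl h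
  set r := cpPass S c (PySem.List.pyRange 0 L 1) (p, false) with hrdef
  have h1 : a - c + 1 ≤ cpMax S c p := foldl_max_mem _ S a haS p
  have h2 : p ≤ cpMax S c p := foldl_max_le_init _ S p
  simp only at hlt
  have h3 : cpMax S c r.1 = max r.1 (cpMax S c p) := by
    have hmm := foldl_max_max (fun a => a - c + 1) S r.1 p
    have hmax : max r.1 p = r.1 := max_eq_left (le_of_lt hlt)
    rw [hmax] at hmm
    unfold cpMax
    exact hmm
  rcases le_total r.1 (cpMax S c p) with hc | hc
  · rw [h3, max_eq_right hc]; omega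
  · rw [h3, max_eq_left hc]; omega

-- port of A.  Notes on faithfulness:
-- * `int(PE2_num / exeblock_per_PE)` is float true division then truncation toward zero; on the
--   domain (|ints| ≤ 2^31) it equals exact truncated division, i.e. Int.tdiv (and the divisor is
--   only reached when the range is nonempty, hence exeblock_per_PE > 0).
-- * the membership list `addr_occu[...]` is the same value at every check, hoisted into S;
--   Pre_ guarantees the lookup succeeds whenever A performs it (range nonempty), so `.getD []`
--   is never an observable default.
def conflict_predict (PE1_num : Int) (addr1 : List Int) (PE2_num : Int) (addr2 : List Int) (PE2_start : Int) (exeblock_per_PE : Int) (cal_op1 : Int) (cal_op2 : Int) (bias : Int) (addr_occu : List (List Int)) : Int :=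
  let S := (PySem.List.pyGet? addr_occu (Int.tdiv PE2_num exeblock_per_PE)).getD []
  cpLoop S (256 - bias) ((addr1.length : Int) * exeblock_per_PE) PE2_start

-- ===== PORT B =====
-- one step of B's single pass: an occupied address inside the current window pushes the start past it
def altStep (c L : Int) (p a : Int) : Int :=
  if p + c ≤ a ∧ a < p + L + c then a - c + 1 else p

def conflict_predict_alt (PE1_num : Int) (addr1 : List Int) (PE2_num : Int) (addr2 : List Int) (PE2_start : Int) (exeblock_per_PE : Int) (cal_op1 : Int) (cal_op2 : Int) (bias : Int) (addr_occu : List (List Int)) : Int :=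
  let L := (addr1.length : Int) * exeblock_per_PE
  if L ≤ 0 then PE2_start
  else
    let occ := (PySem.List.pyGet? addr_occu (Int.tdiv PE2_num exeblock_per_PE)).getD []
    (PySem.List.sorted occ (fun x => x) false).foldl (altStep (256 - bias) L) PE2_start

-- ===== PRECONDITION & SPEC =====
-- Pre_ excludes exactly the inputs on which the Python A raises: when the window is nonempty,
-- the membership test is evaluated and `addr_occu[int(PE2_num / exeblock_per_PE)]` must be a
-- valid (possibly negative) index.  (With an empty window A returns PE2_start without indexing.)
def Pre_conflict_predict (PE1_num : Int) (addr1 : List Int) (PE2_num : Int) (addr2 : List Int) (PE2_start : Int) (exeblock_per_PE : Int) (cal_op1 : Int) (cal_op2 : Int) (bias : Int) (addr_occu : List (List Int)) : Prop :=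
  0 < (addr1.length : Int) * exeblock_per_PE →
    PySem.Raise.InRange addr_occu.length (Int.tdiv PE2_num exeblock_per_PE)
instance (PE1_num : Int) (addr1 : List Int) (PE2_num : Int) (addr2 : List Int) (PE2_start : Int) (exeblock_per_PE : Int) (cal_op1 : Int) (cal_op2 : Int) (bias : Int) (addr_occu : List (List Int)) : Decidable (Pre_conflict_predict PE1_num addr1 PE2_num addr2 PE2_start exeblock_per_PE cal_op1 cal_op2 bias addr_occu) := by unfold Pre_conflict_predict; infer_instance

def pvWitness_conflict_predict : Int × List Int × Int × List Int × Int × Int × Int × Int × Int × List (List Int) :=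
  (0, [0], 0, [], 0, 1, 0, 0, 0, [[5]])

def Spec_conflict_predict (PE1_num : Int) (addr1 : List Int) (PE2_num : Int) (addr2 : List Int) (PE2_start : Int) (exeblock_per_PE : Int) (cal_op1 : Int) (cal_op2 : Int) (bias : Int) (addr_occu : List (List Int)) (out : Int) : Prop := out = conflict_predict_alt PE1_num addr1 PE2_num addr2 PE2_start exeblock_per_PE cal_op1 cal_op2 bias addr_occu
instance (PE1_num : Int) (addr1 : List Int) (PE2_num : Int) (addr2 : List Int) (PE2_start : Int) (exeblock_per_PE : Int) (cal_op1 : Int) (cal_op2 : Int) (bias : Int) (addr_occu : List (List Int)) (out : Int) : Decidable (Spec_conflict_predict PE1_num addr1 PE2_num addr2 PE2_start exeblock_per_PE cal_op1 cal_op2 bias addr_occu out) := by unfold Spec_conflict_predict; infer_instance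

-- ===== CLAIM (what is proved, stated in full; the proofs are below) =====
def Claim_equal_conflict_predict : Prop := ∀ (PE1_num : Int) (addr1 : List Int) (PE2_num : Int) (addr2 : List Int) (PE2_start : Int) (exeblock_per_PE : Int) (cal_op1 : Int) (cal_op2 : Int) (bias : Int) (addr_occu : List (List Int)), Dom_conflict_predict PE1_num addr1 PE2_num addr2 PE2_start exeblock_per_PE cal_op1 cal_op2 bias addr_occu → Pre_conflict_predict PE1_num addr1 PE2_num addr2 PE2_start exeblock_per_PE cal_op1 cal_op2 bias addr_occu → Spec_conflict_predict PE1_num addr1 PE2_num addr2 PE2_start exeblock_per_PE cal_op1 cal_op2 bias addr_occu (conflict_predict PE1_num addr1 PE2_num addr2 PE2_start exeblock_per_PE cal_op1 cal_op2 bias addr_occu)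

-- ===== LEMMAS AND PROOFS =====
-- `Hits S c L q`: the window starting at q is in conflict (some occupied address falls inside it)
def Hits (S : List Int) (c L q : Int) : Prop := ∃ a ∈ S, q + c ≤ a ∧ a < q + L + c

theorem cpPass_inv (S : List Int) (c L : Int) :
    ∀ (idxs : List Int), (∀ i ∈ idxs, 0 ≤ i ∧ i < L) →
      ∀ (p : Int) (f : Bool),
        p ≤ (cpPass S c idxs (p, f)).1 ∧
        ∀ q, p ≤ q → q < (cpPass S c idxs (p, f)).1 → Hits S c L q := by
  intro idxs
  induction idxs with
  | nil => intro _ p f; constructor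
           · simp [cpPass]
           · intro q hq hq'; simp [cpPass] at hq'; omega
  | cons i idxs ih =>
    intro hidx p f
    have hi := hidx i List.mem_cons_self
    have htl : ∀ i ∈ idxs, 0 ≤ i ∧ i < L := fun j hj => hidx j (List.mem_cons_of_mem _ hj)
    by_cases h : S.contains (p + i + c) = true
    · have hmem : p + i + c ∈ S := by simpa using h
      have hstep : cpStep S c (p, f) i = (p + 1, true) := by unfold cpStep; simp [hmem]
      obtain ⟨h1, h2⟩ := ih htl (p + 1) true
      simp only [cpPass, List.foldl_cons, hstep] at *
      constructor
      · omega
      · intro q hq hq'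
        rcases eq_or_lt_of_le hq with rfl | hlt
        · exact ⟨p + i + c, hmem, by omega, by omega⟩
        · exact h2 q (by omega) hq'
    · have hmem : p + i + c ∉ S := by simpa using h
      have hstep : cpStep S c (p, f) i = (p, f) := by unfold cpStep; simp [hmem]
      obtain ⟨h1, h2⟩ := ih htl p f
      simp only [cpPass, List.foldl_cons, hstep] at *
      exact ⟨h1, h2⟩

theorem cpPass_flag_mono (S : List Int) (c : Int) :
    ∀ (idxs : List Int) (st : Int × Bool), st.2 = true → (cpPass S c idxs st).2 = true := by
  intro idxs
  induction idxs with
  | nil => intro st h; simpa [cpPass] using h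
  | cons i idxs ih =>
    intro st h
    have hstep : (cpStep S c st i).2 = true := by unfold cpStep; split <;> simp [h]
    simp only [cpPass, List.foldl_cons] at *
    exact ih _ hstep

theorem cpPass_nohit (S : List Int) (c L : Int) (p : Int)
    (h : (cpPass S c (PySem.List.pyRange 0 L 1) (p, false)).2 = false) :
    (cpPass S c (PySem.List.pyRange 0 L 1) (p, false)).1 = p ∧ ¬ Hits S c L p := by
  suffices hgen : ∀ (idxs : List Int) (p : Int),
      (cpPass S c idxs (p, false)).2 = false →
      cpPass S c idxs (p, false) = (p, false) ∧ ∀ i ∈ idxs, S.contains (p + i + c) = false by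
    obtain ⟨heq, hall⟩ := hgen _ p h
    refine ⟨by rw [heq], ?_⟩
    rintro ⟨a, haS, h1, h2⟩
    have hmem : a - p - c ∈ PySem.List.pyRange 0 L 1 := by
      rw [PySem.List.mem_pyRange_one]; omega
    have := hall _ hmem
    have haddr : p + (a - p - c) + c = a := by ring
    rw [haddr] at this
    have hnot : a ∉ S := by simpa using this
    exact hnot haS
  intro idxs
  induction idxs with
  | nil => intro p _; exact ⟨by simp [cpPass], by simp⟩
  | cons i idxs ih =>
    intro p hflag
    by_cases hc : S.contains (p + i + c) = true
    · exfalso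
      have hmem : p + i + c ∈ S := by simpa using hc
      have hstep : cpStep S c (p, false) i = (p + 1, true) := by unfold cpStep; simp [hmem]
      have := cpPass_flag_mono S c idxs (p + 1, true) rfl
      simp only [cpPass, List.foldl_cons, hstep] at hflag
      simp only [cpPass] at this
      rw [this] at hflag
      exact absurd hflag (by simp)
    · have hmem2 : p + i + c ∉ S := by simpa using hc
      have hstep : cpStep S c (p, false) i = (p, false) := by unfold cpStep; simp [hmem2]
      simp only [cpPass, List.foldl_cons, hstep] at hflag ⊢
      obtain ⟨heq, hall⟩ := ih p hflag
      refine ⟨heq, ?_⟩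
      intro j hj
      rcases List.mem_cons.mp hj with rfl | hj'
      · simpa using hc
      · exact hall j hj'

-- A's loop returns the least conflict-free window start ≥ p
theorem cpLoop_spec (S : List Int) (c L : Int) : ∀ (n : ℕ) (p : Int),
    (cpMax S c p - p).toNat ≤ n →
    p ≤ cpLoop S c L p ∧ ¬ Hits S c L (cpLoop S c L p) ∧
      ∀ q, p ≤ q → q < cpLoop S c L p → Hits S c L q := by
  have hidx : ∀ i ∈ PySem.List.pyRange 0 L 1, (0:Int) ≤ i ∧ i < L := by
    intro i hi
    have := (PySem.List.mem_pyRange_one).mp hi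
    omega
  have hidx0 : ∀ i ∈ PySem.List.pyRange 0 L 1, (0:Int) ≤ i := fun i hi => (hidx i hi).1
  intro n
  induction n with
  | zero =>
    intro p hn
    rw [cpLoop]
    set r := cpPass S c (PySem.List.pyRange 0 L 1) (p, false) with hr
    by_cases hfl : r.2 = true
    · exfalso
      obtain ⟨hlt, a, haS, hge⟩ := cpPass_hit S c _ hidx0 (p, false) rfl hfl
      simp only at hlt
      have h1 : a - c + 1 ≤ cpMax S c p := foldl_max_mem _ S a haS p
      have h2 : p ≤ cpMax S c p := foldl_max_le_init _ S p
      omega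
    · have hfl' : r.2 = false := by simpa using hfl
      rw [dif_neg hfl]
      obtain ⟨heq, hcl⟩ := cpPass_nohit S c L p hfl'
      rw [← hr] at heq
      rw [heq]
      exact ⟨le_refl _, hcl, fun q hq hq' => absurd (lt_of_le_of_lt hq hq') (lt_irrefl p)⟩
  | succ n ihn =>
    intro p hn
    rw [cpLoop]
    set r := cpPass S c (PySem.List.pyRange 0 L 1) (p, false) with hr
    by_cases hfl : r.2 = true
    · rw [dif_pos hfl]
      obtain ⟨hlt, a, haS, hge⟩ := cpPass_hit S c _ hidx0 (p, false) rfl hfl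
      simp only at hlt
      rw [← hr] at hlt
      have h1 : a - c + 1 ≤ cpMax S c p := foldl_max_mem _ S a haS p
      have h2 : p ≤ cpMax S c p := foldl_max_le_init _ S p
      -- measure decreases
      have h3 : cpMax S c r.1 = max r.1 (cpMax S c p) := by
        have hmm := foldl_max_max (fun a => a - c + 1) S r.1 p
        have hmax : max r.1 p = r.1 := max_eq_left (le_of_lt hlt)
        rw [hmax] at hmm
        unfold cpMax
        exact hmm
      have hmeas : (cpMax S c r.1 - r.1).toNat ≤ n := by
        rcases le_total r.1 (cpMax S c p) with hc2 | hc2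
        · rw [h3, max_eq_right hc2]; omega
        · rw [h3, max_eq_left hc2]; omega
      obtain ⟨ha1, ha2, ha3⟩ := ihn r.1 hmeas
      obtain ⟨hp1, hp2⟩ := cpPass_inv S c L _ hidx p false
      rw [← hr] at hp1 hp2
      refine ⟨le_trans hp1 ha1, ha2, ?_⟩
      intro q hq hq'
      by_cases hcase : q < r.1
      · exact hp2 q hq hcase
      · exact ha3 q (by omega) hq'
    · have hfl' : r.2 = false := by simpa using hfl
      rw [dif_neg hfl]
      obtain ⟨heq, hcl⟩ := cpPass_nohit S c L p hfl'
      rw [← hr] at heq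
      rw [heq]
      exact ⟨le_refl _, hcl, fun q hq hq' => absurd (lt_of_le_of_lt hq hq') (lt_irrefl p)⟩

-- B's pass returns a conflict-free start, with everything in between in conflict
theorem altFold_spec (c L : Int) :
    ∀ (xs : List Int), xs.Pairwise (· ≤ ·) → ∀ (p : Int),
      p ≤ xs.foldl (altStep c L) p ∧
      (xs.foldl (altStep c L) p = p ∨ ∃ b ∈ xs, xs.foldl (altStep c L) p = b - c + 1) ∧
      (∀ q, p ≤ q → q < xs.foldl (altStep c L) p → ∃ a ∈ xs, q + c ≤ a ∧ a < q + L + c) ∧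
      (∀ a ∈ xs, ¬(xs.foldl (altStep c L) p + c ≤ a ∧ a < xs.foldl (altStep c L) p + L + c)) := by
  intro xs
  induction xs with
  | nil =>
    intro _ p
    refine ⟨by simp, Or.inl (by simp), ?_, by simp⟩
    intro q hq hq'; simp at hq'; omega
  | cons a xs ih =>
    intro hsort p
    have hle : ∀ b ∈ xs, a ≤ b := fun b hb => (List.pairwise_cons.mp hsort).1 b hb
    have htl := (List.pairwise_cons.mp hsort).2
    by_cases hhit : p + c ≤ a ∧ a < p + L + c
    · have hstep : altStep c L p a = a - c + 1 := by unfold altStep; simp [hhit]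
      obtain ⟨ih1, ih2, ih3, ih4⟩ := ih htl (a - c + 1)
      simp only [List.foldl_cons, hstep] at *
      set r := xs.foldl (altStep c L) (a - c + 1) with hrdef
      refine ⟨by omega, ?_, ?_, ?_⟩
      · rcases ih2 with h | ⟨b, hb, hb'⟩
        · exact Or.inr ⟨a, List.mem_cons_self, h⟩
        · exact Or.inr ⟨b, List.mem_cons_of_mem _ hb, hb'⟩
      · intro q hq hq'
        by_cases hqa : q ≤ a - c
        · exact ⟨a, List.mem_cons_self, by omega, by omega⟩
        · obtain ⟨b, hb, hb'⟩ := ih3 q (by omega) hq'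
          exact ⟨b, List.mem_cons_of_mem _ hb, hb'⟩
      · intro b hb
        rcases List.mem_cons.mp hb with rfl | hb'
        · omega
        · exact ih4 b hb'
    · have hstep : altStep c L p a = p := by unfold altStep; simp only [if_neg hhit]
      obtain ⟨ih1, ih2, ih3, ih4⟩ := ih htl p
      simp only [List.foldl_cons, hstep] at *
      set r := xs.foldl (altStep c L) p with hrdef
      refine ⟨ih1, ?_, ?_, ?_⟩
      · rcases ih2 with h | ⟨b, hb, hb'⟩
        · exact Or.inl h
        · exact Or.inr ⟨b, List.mem_cons_of_mem _ hb, hb'⟩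
      · intro q hq hq'
        obtain ⟨b, hb, hb'⟩ := ih3 q hq hq'
        exact ⟨b, List.mem_cons_of_mem _ hb, hb'⟩
      · intro b hb
        rcases List.mem_cons.mp hb with rfl | hb'
        · -- the head is not in p's window; if r moved, it moved past some later (≥ b) element
          rcases ih2 with heq | ⟨b', hb', hb''⟩
          · rw [heq]; exact hhit
          · have := hle b' hb'
            omega
        · exact ih4 b hb'

-- ===== VERDICT helper =====
theorem conflict_predict_eq (PE1_num : Int) (addr1 : List Int) (PE2_num : Int) (addr2 : List Int) (PE2_start : Int) (exeblock_per_PE : Int) (cal_op1 : Int) (cal_op2 : Int) (bias : Int) (addr_occu : List (List Int)) :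
    conflict_predict PE1_num addr1 PE2_num addr2 PE2_start exeblock_per_PE cal_op1 cal_op2 bias addr_occu
      = conflict_predict_alt PE1_num addr1 PE2_num addr2 PE2_start exeblock_per_PE cal_op1 cal_op2 bias addr_occu := by
  unfold conflict_predict conflict_predict_alt
  set L := (addr1.length : Int) * exeblock_per_PE with hL
  set S := (PySem.List.pyGet? addr_occu (Int.tdiv PE2_num exeblock_per_PE)).getD [] with hS
  set c := (256 : Int) - bias with hc
  by_cases hLe : L ≤ 0
  · -- empty window: A's pass sees an empty range, B returns immediately
    rw [cpLoop]
    have hnil : PySem.List.pyRange 0 L 1 = [] := PySem.List.pyRange_one_eq_nil (by omega)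
    simp [hnil, cpPass, hLe]
  · simp only [if_neg hLe]
    set xs := PySem.List.sorted S (fun x => x) false with hxs
    have hperm : ∀ a : Int, a ∈ xs ↔ a ∈ S := fun a => PySem.List.mem_sorted S (fun x => x) false a
    have hsort : xs.Pairwise (· ≤ ·) := PySem.List.sorted_pairwise S (fun x => x)
    obtain ⟨ha1, ha2, ha3⟩ := cpLoop_spec S c L _ PE2_start (le_refl _)
    obtain ⟨hb1, _, hb3, hb4⟩ := altFold_spec c L xs hsort PE2_start
    set rA := cpLoop S c L PE2_start
    set rB := xs.foldl (altStep c L) PE2_start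
    rcases lt_trichotomy rA rB with h | h | h
    · exfalso
      obtain ⟨a, ha, hw⟩ := hb3 rA ha1 h
      exact ha2 ⟨a, (hperm a).mp ha, hw⟩
    · exact h
    · exfalso
      obtain ⟨a, ha, hw1, hw2⟩ := ha3 rB hb1 h
      exact hb4 a ((hperm a).mpr ha) ⟨hw1, hw2⟩

-- ===== VERDICT (by name: the statement is the Claim_ definition above) =====
theorem conflict_predict_spec : Claim_equal_conflict_predict := by
  intro PE1_num addr1 PE2_num addr2 PE2_start exeblock_per_PE cal_op1 cal_op2 bias addr_occu _ _
  unfold Spec_conflict_predict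
  exact conflict_predict_eq PE1_num addr1 PE2_num addr2 PE2_start exeblock_per_PE cal_op1 cal_op2 bias addr_occu
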